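-- pv_equiv track=rewrite | github.com/namgyumin/Baekjoon | 프로그래머스/2/388352. 비밀 코드 해독/비밀 코드 해독.py | solution
-- ===== SOURCE A (Python) =====
-- from itertools import combinations
--
-- def solution(n, q, ans):
--     answer = 0
--
--     guess_sets = [set(a) for a in q]
--
--     for comb in combinations(range(1, n+1), 5):
--         val = True
--
--         for i, guess_set in enumerate(guess_sets):
--             temp = len(set(comb) & guess_set)
--             if(temp != ans[i]):
--                 val = False;
--                 break;
--
--         if(val == True):
--             answer += 1
--
--     return answer
-- ===== SOURCE B (Python) =====
-- from itertools import combinations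
--
-- def solution(n, q, ans):
--     m = len(q)
--     # inverted index: value -> list of query indices whose set contains it
--     idx = {}
--     for i, a in enumerate(q):
--         for v in set(a):
--             idx.setdefault(v, []).append(i)
--     target = list(ans[:m])
--     total = 0
--     for comb in combinations(range(1, n + 1), 5):
--         counts = [0] * m
--         for v in comb:
--             for i in idx.get(v, []):
--                 counts[i] += 1
--         if counts == target:
--             total += 1
--     return total
-- ===== Notes on version B (the rewrite author's own statement) =====
-- stated objective: alternative
-- what changed: B precomputes an inverted index (value -> query indices containing it) once, and for each 5-combination accumulates per-query counters by iterating the combination's elements and comparing the counter vector to ans, instead of A's per-combination set-intersection scan over every query.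
-- outside the precondition, e.g. on solution(5, [[1], [2]], [0]): A returns 0, B returns 0; on solution(5, [[1], [2]], [1]): A raises IndexError, B returns 0
import Mathlib
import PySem

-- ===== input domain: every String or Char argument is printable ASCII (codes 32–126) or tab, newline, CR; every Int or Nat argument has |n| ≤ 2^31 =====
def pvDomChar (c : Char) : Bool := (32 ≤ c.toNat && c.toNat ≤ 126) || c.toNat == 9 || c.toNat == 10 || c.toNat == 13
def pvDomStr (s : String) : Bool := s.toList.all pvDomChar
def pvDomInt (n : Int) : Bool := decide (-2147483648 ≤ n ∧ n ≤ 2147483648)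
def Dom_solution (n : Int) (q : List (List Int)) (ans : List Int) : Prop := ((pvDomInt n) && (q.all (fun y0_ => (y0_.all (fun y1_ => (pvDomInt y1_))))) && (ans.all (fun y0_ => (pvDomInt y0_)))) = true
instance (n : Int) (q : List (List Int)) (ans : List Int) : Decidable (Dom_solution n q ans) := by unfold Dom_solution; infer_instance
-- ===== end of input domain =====

-- B replaces A's per-combination per-query set-intersection scan by an inverted index
-- (value -> query indices) and per-element counter accumulation; objective: alternative.

-- ===== PORT A =====
-- itertools.combinations(xs, 5): all 5-element subsequences, in lexicographic order
def combs : Nat → List Int → List (List Int)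
  | 0, _ => [[]]
  | _+1, [] => []
  | k+1, x :: xs => (combs k xs).map (fun c => x :: c) ++ combs (k+1) xs

-- the inner 'for i, guess_set in enumerate(guess_sets)' loop with its break;
-- ans[i] out of range is Python's IndexError, excluded by Pre_solution (the port yields false there)
def loopA (comb ans : List Int) : List (Int × PySem.Set Int) → Bool
  | [] => true
  | p :: rest =>
    match PySem.List.pyGet? ans p.1 with
    | none => false
    | some a =>
      if PySem.Set.len (PySem.Set.inter (PySem.Set.ofList comb) p.2) ≠ a then false
      else loopA comb ans rest

def solution (n : Int) (q : List (List Int)) (ans : List Int) : Int :=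
  let guessSets := q.map (fun a => PySem.Set.ofList a)
  (combs 5 (PySem.List.pyRange 1 (n+1) 1)).foldl
    (fun answer comb =>
      if loopA comb ans (PySem.List.enumerate guessSets 0) then answer + 1 else answer) 0

-- ===== PORT B =====
-- idx: for each value v, the list of query indices i with v in set(q[i])
def buildIdx (q : List (List Int)) : PySem.Dict Int (List Int) :=
  (PySem.List.enumerate q 0).foldl
    (fun d p => (PySem.Set.ofList p.2).foldl
        (fun d v => PySem.Dict.insert d v (PySem.Dict.getD d v [] ++ [p.1])) d)
    PySem.Dict.empty

-- counts = [0]*m; for v in comb: for i in idx.get(v, []): counts[i] += 1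
def countsFor (idx : PySem.Dict Int (List Int)) (m : Nat) (comb : List Int) : List Int :=
  comb.foldl
    (fun counts v => (PySem.Dict.getD idx v []).foldl
        (fun counts i => PySem.List.pySetD counts i (PySem.List.pyGetD counts i 0 + 1)) counts)
    (List.replicate m 0)

def solution_alt (n : Int) (q : List (List Int)) (ans : List Int) : Int :=
  let m := q.length
  let idx := buildIdx q
  let target := PySem.List.slice ans none (some (m : Int))
  (combs 5 (PySem.List.pyRange 1 (n+1) 1)).foldl
    (fun total comb => if countsFor idx m comb = target then total + 1 else total) 0

-- ===== PRECONDITION & SPEC =====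
-- Pre_ excludes inputs with len(ans) < len(q) on which some 5-combination exists (n ≥ 5):
-- there A raises IndexError on ans[i] unless an earlier query mismatches and breaks first —
-- whether A returns at all then is an accident of the data, so the whole region is excluded.
def Pre_solution (n : Int) (q : List (List Int)) (ans : List Int) : Prop :=
  n < 5 ∨ q.length ≤ ans.length
instance (n : Int) (q : List (List Int)) (ans : List Int) : Decidable (Pre_solution n q ans) := by
  unfold Pre_solution; infer_instance

def pvWitness_solution : Int × List (List Int) × List Int := (5, [[1, 2]], [2])

def Spec_solution (n : Int) (q : List (List Int)) (ans : List Int) (out : Int) : Prop := out = solution_alt n q ans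
instance (n : Int) (q : List (List Int)) (ans : List Int) (out : Int) : Decidable (Spec_solution n q ans out) := by unfold Spec_solution; infer_instance

-- ===== CLAIM (what is proved, stated in full; the proofs are below) =====
def Claim_equal_solution : Prop := ∀ (n : Int) (q : List (List Int)) (ans : List Int), Dom_solution n q ans → Pre_solution n q ans → Spec_solution n q ans (solution n q ans)

-- ===== LEMMAS AND PROOFS =====

def foldIncr (is : List Int) (counts : List Int) : List Int :=
  is.foldl (fun counts i => PySem.List.pySetD counts i (PySem.List.pyGetD counts i 0 + 1)) counts

theorem combs_sublist (k : Nat) (xs : List Int) : ∀ c ∈ combs k xs, c.Sublist xs := by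
  induction xs generalizing k with
  | nil => intro c hc; cases k with
    | zero => simp [combs] at hc; simp [hc]
    | succ k => simp [combs] at hc
  | cons x xs ih =>
    intro c hc
    cases k with
    | zero => simp [combs] at hc; simp [hc]
    | succ k =>
      simp only [combs, List.mem_append, List.mem_map] at hc
      rcases hc with ⟨c', hc', rfl⟩ | hc
      · exact (ih k c' hc').cons₂ x
      · exact (ih (k+1) c hc).cons x

theorem combs_eq_nil (k : Nat) (xs : List Int) (h : xs.length < k) : combs k xs = [] := by
  induction xs generalizing k with
  | nil => cases k with
    | zero => simp at h
    | succ k => rfl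
  | cons x xs ih =>
    cases k with
    | zero => simp at h
    | succ k =>
      simp only [combs]
      rw [ih k (by simpa using h), ih (k+1) (by simp at h ⊢; omega)]
      simp

theorem foldIncr_getElem? (is : List Int) (counts : List Int)
    (h : ∀ i ∈ is, 0 ≤ i ∧ i < (counts.length : Int)) (j : Nat) :
    (foldIncr is counts)[j]? = counts[j]?.map (fun x => x + (is.count (j : Int) : Int)) := by
  induction is generalizing counts with
  | nil =>
    simp only [foldIncr, List.foldl_nil, List.count_nil]
    cases counts[j]? <;> simp
  | cons i is ih =>
    have hi := h i (by simp)
    have hlt : i.toNat < counts.length := by omega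
    have hset : PySem.List.pySetD counts i (PySem.List.pyGetD counts i 0 + 1)
        = counts.set i.toNat (counts[i.toNat] + 1) := by
      rw [PySem.List.pySetD_of_nonneg (h := hi.1), PySem.List.pyGetD_eq_getElem (h0 := hi.1) (h1 := by simpa using hi.2)]
    have hstep : foldIncr (i :: is) counts
        = foldIncr is (counts.set i.toNat (counts[i.toNat] + 1)) := by
      simp only [foldIncr, List.foldl_cons, hset]
    rw [hstep, ih _ (by intro x hx; simpa using h x (by simp [hx])) ]
    rw [List.getElem?_set]
    by_cases hij : i.toNat = j
    · have hij' : i = (j : Int) := by omega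
      simp [hij, hlt, List.count_cons, hij ▸ hlt, hij']
      cases h' : counts[j]? with
      | none => have := List.getElem?_eq_none_iff.mp h'; omega
      | some x =>
        have : counts[j] = x := by
          have := List.getElem?_eq_some_iff.mp h'; rcases this with ⟨hh, e⟩; exact e
        simp [← hij, this]
        ring
    · have hij' : i ≠ (j : Int) := by omega
      simp [hij, List.count_cons, hij']

-- one query: append i to the bucket of every v in s (s nodup)
theorem inner_getD (s : List Int) (hs : s.Nodup) (d : PySem.Dict Int (List Int)) (i v : Int) :
    (s.foldl (fun d w => PySem.Dict.insert d w (PySem.Dict.getD d w [] ++ [i])) d).getD v []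
      = d.getD v [] ++ (if v ∈ s then [i] else []) := by
  induction s generalizing d with
  | nil => simp
  | cons w s ih =>
    simp only [List.foldl_cons]
    rw [ih (by simpa using hs.of_cons)]
    rw [PySem.Dict.getD_insert]
    by_cases hvw : v = w
    · subst hvw
      have : v ∉ s := by simpa using (List.nodup_cons.mp hs).1
      simp [this]
    · simp [hvw]

theorem buildIdx_getD (q : List (List Int)) (v : Int) :
    (buildIdx q).getD v []
      = ((PySem.List.enumerate q 0).filter (fun p => decide (v ∈ p.2))).map (·.1) := by
  have gen : ∀ (ps : List (Int × List Int)) (d : PySem.Dict Int (List Int)),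
      (ps.foldl (fun d p => (PySem.Set.ofList p.2).foldl
          (fun d w => PySem.Dict.insert d w (PySem.Dict.getD d w [] ++ [p.1])) d) d).getD v []
        = d.getD v [] ++ (ps.filter (fun p => decide (v ∈ p.2))).map (·.1) := by
    intro ps
    induction ps with
    | nil => simp
    | cons p ps ih =>
      intro d
      simp only [List.foldl_cons]
      rw [ih]
      rw [inner_getD _ (PySem.Set.nodup_ofList p.2)]
      by_cases hv : v ∈ p.2
      · simp [List.filter_cons, hv, PySem.Set.mem_ofList]
      · simp [List.filter_cons, hv, PySem.Set.mem_ofList]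
  rw [buildIdx, gen]
  rfl

theorem mem_buildIdx (q : List (List Int)) (v i : Int) :
    i ∈ (buildIdx q).getD v [] ↔ ∃ (k : Nat) (h : k < q.length), i = (k : Int) ∧ v ∈ q[k] := by
  rw [buildIdx_getD]
  simp only [List.mem_map, List.mem_filter, PySem.List.mem_enumerate_iff]
  constructor
  · rintro ⟨p, ⟨⟨k, hk, rfl⟩, hv⟩, rfl⟩
    exact ⟨k, hk, by simp, by simpa using hv⟩
  · rintro ⟨k, hk, rfl, hv⟩
    exact ⟨((k : Int), q[k]), ⟨⟨k, hk, by simp⟩, by simpa using hv⟩, rfl⟩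

theorem nodup_buildIdx (q : List (List Int)) (v : Int) :
    ((buildIdx q).getD v []).Nodup := by
  rw [buildIdx_getD]
  have h1 : ((PySem.List.enumerate q 0).filter (fun p => decide (v ∈ p.2))).Pairwise
      (fun p q => p.1 < q.1) :=
    (PySem.List.pairwise_lt_enumerate q 0).sublist List.filter_sublist
  have h2 : ((((PySem.List.enumerate q 0).filter (fun p => decide (v ∈ p.2)))).map (·.1)).Pairwise (· ≠ ·) :=
    h1.map _ (fun a b hab => by exact fun e => absurd e (by omega))
  exact h2

-- countsFor as a single increment pass over the concatenated buckets
theorem countsFor_eq_foldIncr (idx : PySem.Dict Int (List Int)) (m : Nat) (comb : List Int) :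
    countsFor idx m comb = foldIncr (comb.flatMap (fun v => PySem.Dict.getD idx v [])) (List.replicate m 0) := by
  suffices h : ∀ (c0 : List Int),
      comb.foldl (fun counts v => foldIncr (PySem.Dict.getD idx v []) counts) c0
        = foldIncr (comb.flatMap (fun v => PySem.Dict.getD idx v [])) c0 by
    exact h _
  induction comb with
  | nil => intro c0; simp [foldIncr]
  | cons v comb ih =>
    intro c0
    simp only [List.foldl_cons, List.flatMap_cons, foldIncr, List.foldl_append] at *
    rw [ih]

theorem count_flatMap_nodup (comb : List Int) (f : Int → List Int) (j : Int)
    (hf : ∀ v, (f v).Nodup) :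
    (comb.flatMap f).count j = comb.countP (fun v => decide (j ∈ f v)) := by
  induction comb with
  | nil => simp
  | cons v comb ih =>
    simp only [List.flatMap_cons, List.count_append, List.countP_cons, ih]
    by_cases hj : j ∈ f v
    · rw [List.count_eq_one_of_mem (hf v) hj]; simp [hj]; omega
    · rw [List.count_eq_zero_of_not_mem hj]; simp [hj]

theorem countsFor_getElem? (q : List (List Int)) (comb : List Int) (j : Nat) :
    (countsFor (buildIdx q) q.length comb)[j]?
      = if h : j < q.length
          then some ((comb.countP (fun v => decide (v ∈ q[j])) : Int))
          else none := by
  rw [countsFor_eq_foldIncr, foldIncr_getElem?]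
  · rw [count_flatMap_nodup _ _ _ (fun v => nodup_buildIdx q v)]
    by_cases h : j < q.length
    · rw [List.getElem?_replicate]
      simp only [h, if_pos, dif_pos]
      have : (fun v => decide ((j:Int) ∈ (buildIdx q).getD v [])) = fun v => decide (v ∈ q[j]) := by
        funext v
        simp only [decide_eq_decide, mem_buildIdx]
        constructor
        · rintro ⟨k, hk, hkj, hv⟩
          have : k = j := by omega
          subst this; exact hv
        · intro hv; exact ⟨j, h, rfl, hv⟩
      simp [this]
    · simp [List.getElem?_replicate, h]
  · intro i hi
    simp only [List.mem_flatMap] at hi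
    obtain ⟨v, _, hiv⟩ := hi
    obtain ⟨k, hk, rfl, _⟩ := (mem_buildIdx q v i).mp hiv
    simp only [List.length_replicate]
    omega

theorem loopA_eq_all (comb ans : List Int) (ps : List (Int × PySem.Set Int))
    (h : ∀ p ∈ ps, (PySem.List.pyGet? ans p.1).isSome) :
    loopA comb ans ps
      = ps.all (fun p => decide (some (PySem.Set.len (PySem.Set.inter (PySem.Set.ofList comb) p.2))
          = PySem.List.pyGet? ans p.1)) := by
  induction ps with
  | nil => rfl
  | cons p ps ih =>
    obtain ⟨a, ha⟩ := Option.isSome_iff_exists.mp (h p (by simp))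
    rw [List.all_cons, loopA, ha]
    dsimp only
    by_cases he : PySem.Set.len (PySem.Set.inter (PySem.Set.ofList comb) p.2) = a
    · rw [if_neg (by simpa using he), ih (fun p hp => h p (by simp [hp]))]
      have hd : (decide (some (((PySem.Set.ofList comb).inter p.2).len) = some a)) = true := by
        simpa [PySem.Set.len] using he
      rw [hd, Bool.true_and]
    · rw [if_pos (by simpa using he)]
      have hd : (decide (some (((PySem.Set.ofList comb).inter p.2).len) = some a)) = false := by
        simpa [PySem.Set.len] using he
      rw [hd, Bool.false_and]

-- |set(comb) & gs| for a duplicate-free comb is a countP over comb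
theorem len_inter_of_nodup (comb : List Int) (hnd : comb.Nodup) (gs : PySem.Set Int) :
    PySem.Set.len (PySem.Set.inter (PySem.Set.ofList comb) gs)
      = (comb.countP (fun v => gs.contains v) : Int) := by
  rw [PySem.Set.ofList_eq_self_of_nodup comb hnd]
  simp [PySem.Set.len, PySem.Set.inter, List.countP_eq_length_filter]

theorem key (q : List (List Int)) (ans comb : List Int)
    (hlen : q.length ≤ ans.length) (hnd : comb.Nodup) :
    loopA comb ans (PySem.List.enumerate (q.map (fun a => PySem.Set.ofList a)) 0)
      = decide (countsFor (buildIdx q) q.length comb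
          = PySem.List.slice ans none (some (q.length : Int))) := by
  have hget : ∀ p ∈ PySem.List.enumerate (q.map (fun a => PySem.Set.ofList a)) 0,
      (PySem.List.pyGet? ans p.1).isSome := by
    intro p hp
    obtain ⟨k, hk, rfl⟩ := (PySem.List.mem_enumerate_iff _ _ _).mp hp
    simp only [List.length_map] at hk
    rw [Option.isSome_iff_exists]
    exact ⟨ans[k]'(by omega), by simpa using PySem.List.pyGet?_ofNat (h := by omega)⟩
  rw [loopA_eq_all comb ans _ hget, PySem.List.slice_to_natCast]
  rw [Bool.eq_iff_iff]
  simp only [List.all_eq_true, decide_eq_true_eq]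
  constructor
  · intro hA
    apply List.ext_getElem?
    intro j
    rw [countsFor_getElem?]
    by_cases hj : j < q.length
    · have hp := hA ((j : Int), PySem.Set.ofList (q[j]'hj))
        (by rw [PySem.List.mem_enumerate_iff]; exact ⟨j, by simpa using hj, by simp⟩)
      rw [len_inter_of_nodup comb hnd] at hp
      rw [PySem.List.pyGet?_natCast] at hp
      have hans : ans[j]? = some (ans[j]'(by omega)) := List.getElem?_eq_some_iff.mpr ⟨by omega, rfl⟩
      rw [hans] at hp
      have hcount : (comb.countP (fun v => (PySem.Set.ofList (q[j]'hj)).contains v))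
          = comb.countP (fun v => decide (v ∈ q[j]'hj)) := by
        apply List.countP_congr
        intro v _
        simp [PySem.Set.mem_ofList]
      rw [hcount] at hp
      have := Option.some.inj hp
      rw [dif_pos hj, List.getElem?_take, if_pos hj, List.getElem?_eq_some_iff.mpr ⟨by omega, rfl⟩]
      exact congrArg some this
    · rw [dif_neg hj, List.getElem?_take, if_neg hj]  -- hmm take: j ≥ m → none
  · intro hB p hp
    obtain ⟨k, hk, rfl⟩ := (PySem.List.mem_enumerate_iff _ _ _).mp hp
    simp only [List.length_map] at hk
    have hj := congrArg (fun l => l[k]?) hB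
    simp only at hj
    rw [countsFor_getElem?, dif_pos hk] at hj
    rw [List.getElem?_take, if_pos hk] at hj
    simp only [zero_add]
    rw [len_inter_of_nodup comb hnd]
    have : (List.map (fun a => PySem.Set.ofList a) q)[k] = PySem.Set.ofList (q[k]'hk) := by simp
    rw [this, PySem.List.pyGet?_natCast]
    rw [List.getElem?_eq_some_iff.mpr ⟨by omega, rfl⟩] at hj ⊢
    have hcount : (comb.countP (fun v => (PySem.Set.ofList (q[k]'hk)).contains v))
        = comb.countP (fun v => decide (v ∈ q[k]'hk)) := by
      apply List.countP_congr
      intro v _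
      simp [PySem.Set.mem_ofList]
    rw [hcount]
    exact congrArg some (Option.some.inj hj)

-- ===== VERDICT (by name: the statement is the Claim_ definition above) =====
theorem solution_spec : Claim_equal_solution := by
  intro n q ans _hdom hpre
  unfold Spec_solution
  by_cases hlen : q.length ≤ ans.length
  · simp only [solution, solution_alt]
    apply PySem.List.foldl_congr_mem
    intro acc comb hc
    have hnd : comb.Nodup :=
      ((combs_sublist 5 _ comb hc).nodup (PySem.List.nodup_pyRange_one 1 (n+1)))
    rw [key q ans comb hlen hnd]
    simp only [decide_eq_true_eq]
  · have hn : n < 5 := by rcases hpre with h | h; exacts [h, absurd h hlen]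
    have hr : (PySem.List.pyRange 1 (n+1) 1).length < 5 := by
      rw [PySem.List.length_pyRange_one]; omega
    simp only [solution, solution_alt, combs_eq_nil 5 _ hr, List.foldl_nil]
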